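-- pv_equiv track=rewrite | github.com/SergeyRusskih/CodingChalenges | ad_hoc/max_sum_three.py | max_sum_three
-- ===== SOURCE A (Python) =====
-- def max_sum_three(nums):
--
--     def helper(arr, remainder, substracted):
--         if remainder < 3: return 0
--         if remainder % 3 == 0: return remainder
--
--         result = 0
--         for i, item in enumerate(arr):
--             if i in substracted: continue
--             substracted.add(i)
--             result = max(result, helper(arr, remainder-item, substracted))
--             substracted.remove(i)
--
--         return result
--
--     return helper(nums, sum(nums), set())
-- ===== SOURCE B (Python) =====
-- def max_sum_three(nums):
--     n = len(nums)
--     memo = {}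
--
--     def solve(mask, s):
--         if s < 3:
--             return 0
--         if s % 3 == 0:
--             return s
--         if mask in memo:
--             return memo[mask]
--         best = 0
--         for i in range(n):
--             if (mask >> i) & 1:
--                 best = max(best, solve(mask ^ (1 << i), s - nums[i]))
--         memo[mask] = best
--         return best
--
--     return solve((1 << n) - 1, sum(nums))
-- ===== Notes on version B (the rewrite author's own statement) =====
-- stated objective: alternative
-- what changed: Replaces A's unmemoized backtracking over a mutable set of subtracted indices with a top-down dynamic program memoized over the bitmask of still-kept indices (same recurrence and early returns, so exactly equal everywhere, negatives included).
import Mathlib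
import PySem

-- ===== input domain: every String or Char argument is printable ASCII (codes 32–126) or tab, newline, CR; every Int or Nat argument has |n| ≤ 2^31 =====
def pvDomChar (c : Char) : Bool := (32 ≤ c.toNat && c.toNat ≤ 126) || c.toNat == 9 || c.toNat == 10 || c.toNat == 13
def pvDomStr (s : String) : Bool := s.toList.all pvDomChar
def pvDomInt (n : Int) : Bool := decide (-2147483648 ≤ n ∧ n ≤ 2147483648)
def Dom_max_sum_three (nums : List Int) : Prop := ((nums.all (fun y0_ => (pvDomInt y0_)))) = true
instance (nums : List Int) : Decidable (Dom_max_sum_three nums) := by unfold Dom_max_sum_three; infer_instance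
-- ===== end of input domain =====

-- B replaces A's unmemoized backtracking over a mutable set of subtracted indices by a
-- top-down dynamic program memoized over the bitmask of still-kept indices: the same
-- recurrence with the same early returns, so the two agree exactly on every input.

-- ===== PORT A =====
-- helper(arr, remainder, substracted); Python's backtracking add/remove pair is rendered by
-- passing (substracted.add i) to the recursive call only.  The fuel argument (depth counter)
-- is only a totality guard: the recursion depth is bounded by arr.length + 1, so the fuel-0
-- branch is never reached from max_sum_three's top-level call.
def pyHelper (arr : List Int) : Nat → Int → PySem.Set Int → Int
  | 0, _, _ => 0
  | fuel+1, r, sub =>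
    if r < 3 then 0
    else if PySem.Int.mod r 3 = 0 then r
    else (PySem.List.enumerate arr).foldl
      (fun res p =>
        if PySem.Set.contains sub p.1 then res
        else max res (pyHelper arr fuel (r - p.2) (PySem.Set.add sub p.1)))
      0

def max_sum_three (nums : List Int) : Int :=
  pyHelper nums (nums.length + 1) (nums.foldl (· + ·) 0) PySem.Set.empty

-- ===== PORT B =====
-- solve(mask, s) with the memo dict threaded through; `nums[i]` is ported as getD because the
-- loop index satisfies i < len(nums); the fuel argument is the same depth-bound totality guard
-- as in port A (each recursive call clears one bit of mask, so depth ≤ nums.length + 1).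
def solveB (nums : List Int) : Nat → Nat → Int → PySem.Dict Nat Int → Int × PySem.Dict Nat Int
  | 0, _, _, memo => (0, memo)
  | fuel+1, mask, s, memo =>
    if s < 3 then (0, memo)
    else if PySem.Int.mod s 3 = 0 then (s, memo)
    else
      match memo.get? mask with
      | some v => (v, memo)
      | none =>
        let p := (List.range nums.length).foldl
          (fun (acc : Int × PySem.Dict Nat Int) i =>
            if (mask >>> i) &&& 1 = 1 then
              let q := solveB nums fuel (mask ^^^ (1 <<< i)) (s - nums.getD i 0) acc.2
              (max acc.1 q.1, q.2)
            else acc)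
          (0, memo)
        (p.1, p.2.insert mask p.1)

def max_sum_three_alt (nums : List Int) : Int :=
  (solveB nums (nums.length + 1) ((1 <<< nums.length) - 1) (nums.foldl (· + ·) 0)
    PySem.Dict.empty).1

-- ===== PRECONDITION & SPEC =====
def Spec_max_sum_three (nums : List Int) (out : Int) : Prop := out = max_sum_three_alt nums
instance (nums : List Int) (out : Int) : Decidable (Spec_max_sum_three nums out) := by unfold Spec_max_sum_three; infer_instance

-- ===== CLAIM (what is proved, stated in full; the proofs are below) =====
def Claim_equal_max_sum_three : Prop := ∀ (nums : List Int), Dom_max_sum_three nums → Spec_max_sum_three nums (max_sum_three nums)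

-- ===== LEMMAS AND PROOFS =====

theorem testBit_one (k : Nat) : Nat.testBit 1 k = decide (k = 0) := by
  cases k with
  | zero => simp
  | succ m => simp [Nat.testBit_add_one]

theorem testBit_xor_shift (n i j : Nat) :
    (n ^^^ (1 <<< i)).testBit j = ((n.testBit j) != decide (j = i)) := by
  simp [Nat.testBit_xor, Nat.testBit_shiftLeft, testBit_one]
  rcases Nat.lt_trichotomy j i with h | h | h
  · simp [Nat.not_le.2 h, Nat.ne_of_lt h]
  · simp [h]
  · simp [Nat.le_of_lt h, Nat.ne_of_gt h]
    omega

theorem xor_lt (n i : Nat) (h : n.testBit i = true) : n ^^^ (1 <<< i) < n := by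
  apply Nat.lt_of_testBit i
  · rw [testBit_xor_shift]; simp [h]
  · exact h
  · intro j hj
    rw [testBit_xor_shift]; simp [Nat.ne_of_gt hj]

theorem cond_iff (mask j : Nat) : ((mask >>> j) &&& 1 = 1) ↔ mask.testBit j = true := by
  have hcomm : 1 &&& (mask >>> j) = (mask >>> j) &&& 1 := Nat.and_comm _ _
  simp only [Nat.testBit, hcomm, Nat.and_one_is_mod, bne_iff_ne, ne_eq, decide_eq_true_eq]
  omega

theorem set_contains_add (s : PySem.Set Int) (x y : Int) :
    (PySem.Set.add s x).contains y = (s.contains y || y == x) := by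
  unfold PySem.Set.add PySem.Set.contains
  split
  · next h => simp [List.contains_eq_mem] at *
              by_cases hyx : y = x <;> simp [hyx, h]
  · next h => by_cases hyx : y = x <;> simp [List.contains_eq_mem, hyx]

-- sum of the entries of nums whose index-bit is set in mask
def bitSum (nums : List Int) (mask : Nat) : Int :=
  (((List.range nums.length).filter (fun i => mask.testBit i)).map (fun i => nums.getD i 0)).sum

-- number of set bits of mask below n
def cnt (mask n : Nat) : Nat :=
  ((List.range n).filter (fun i => mask.testBit i)).length

-- the common value function of both programs, by well-founded recursion on the kept-mask
def W (nums : List Int) (mask : Nat) : Int :=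
  if bitSum nums mask < 3 then 0
  else if PySem.Int.mod (bitSum nums mask) 3 = 0 then bitSum nums mask
  else (List.range nums.length).foldl
    (fun v i => if h : mask.testBit i then max v (W nums (mask ^^^ (1 <<< i))) else v) 0
  termination_by mask
  decreasing_by exact xor_lt _ _ h

theorem filter_flip_erase (p q : Nat → Bool) (i : Nat) (hqi : q i = false)
    (hpq : ∀ j, j ≠ i → q j = p j) :
    ∀ (l : List Nat), l.Nodup → l.filter q = (l.filter p).erase i := by
  intro l
  induction l with
  | nil => intro _; simp
  | cons x t ih =>
    intro hnd
    rcases List.nodup_cons.1 hnd with ⟨hx, hndt⟩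
    by_cases hxi : x = i
    · subst hxi
      have ht : t.filter q = t.filter p :=
        List.filter_congr (fun j hj => hpq j (fun he => hx (he ▸ hj)))
      by_cases hp : p x = true
      · rw [List.filter_cons_of_neg (by simp [hqi]), List.filter_cons_of_pos hp,
            List.erase_cons_head, ht]
      · rw [List.filter_cons_of_neg (by simp [hqi]), List.filter_cons_of_neg (by simp [hp])]
        exact ih hndt
    · have hq : q x = p x := hpq x hxi
      by_cases hp : p x = true
      · rw [List.filter_cons_of_pos (by rw [hq]; exact hp), List.filter_cons_of_pos hp,
            List.erase_cons_tail (by simp [hxi]), ih hndt]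
      · rw [List.filter_cons_of_neg (by simp [hq, hp]), List.filter_cons_of_neg (by simp [hp]),
            ih hndt]

theorem filter_xor (n mask i : Nat) (h : mask.testBit i = true) :
    (List.range n).filter (fun j => (mask ^^^ (1 <<< i)).testBit j)
      = ((List.range n).filter (fun j => mask.testBit j)).erase i := by
  apply filter_flip_erase _ _ i _ _ _ List.nodup_range
  · rw [testBit_xor_shift]; simp [h]
  · intro j hj; rw [testBit_xor_shift]; simp [hj]

theorem mem_filter_range (n mask i : Nat) (hi : i < n) (h : mask.testBit i = true) :
    i ∈ (List.range n).filter (fun j => mask.testBit j) := by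
  simp [List.mem_filter, List.mem_range, hi, h]

theorem bitSum_xor (nums : List Int) (mask i : Nat) (hi : i < nums.length)
    (h : mask.testBit i = true) :
    bitSum nums (mask ^^^ (1 <<< i)) = bitSum nums mask - nums.getD i 0 := by
  unfold bitSum
  rw [filter_xor _ _ _ h]
  have hm := mem_filter_range nums.length mask i hi h
  have hs : (((List.range nums.length).filter (fun j => mask.testBit j)).map
        (fun j => nums.getD j 0)).sum
      = nums.getD i 0 + ((((List.range nums.length).filter (fun j => mask.testBit j)).erase i).map
        (fun j => nums.getD j 0)).sum := by
    have := ((List.perm_cons_erase hm).map (fun j => nums.getD j 0)).sum_eq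
    simpa using this
  omega

theorem cnt_xor (mask i n : Nat) (hi : i < n) (h : mask.testBit i = true) :
    cnt (mask ^^^ (1 <<< i)) n = cnt mask n - 1 := by
  unfold cnt
  rw [filter_xor _ _ _ h]
  exact List.length_erase_of_mem (mem_filter_range n mask i hi h)

theorem cnt_pos (mask i n : Nat) (hi : i < n) (h : mask.testBit i = true) :
    1 ≤ cnt mask n :=
  List.length_pos_of_mem (mem_filter_range n mask i hi h)

theorem mask_eq_zero (mask n : Nat) (hlt : mask < 2 ^ n) (hc : cnt mask n = 0) : mask = 0 := by
  have hnil : (List.range n).filter (fun i => mask.testBit i) = [] :=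
    List.length_eq_zero_iff.1 hc
  apply Nat.eq_of_testBit_eq
  intro j
  simp only [Nat.zero_testBit]
  by_cases hj : j < n
  · have := List.filter_eq_nil_iff.1 hnil j (List.mem_range.2 hj)
    simpa using this
  · exact Nat.testBit_eq_false_of_lt
      (lt_of_lt_of_le hlt (Nat.pow_le_pow_right (by norm_num) (Nat.le_of_not_lt hj)))

theorem bitSum_zero (nums : List Int) : bitSum nums 0 = 0 := by
  simp [bitSum, Nat.zero_testBit]

theorem W_zero (nums : List Int) : W nums 0 = 0 := by
  rw [W]
  simp [bitSum_zero]

theorem full_testBit (n j : Nat) : ((1 <<< n) - 1 : Nat).testBit j = decide (j < n) := by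
  rw [Nat.one_shiftLeft]
  exact Nat.testBit_two_pow_sub_one n j

theorem cnt_full (n : Nat) : cnt ((1 <<< n) - 1) n = n := by
  unfold cnt
  rw [List.filter_eq_self.2]
  · exact List.length_range
  · intro j hj
    simp [full_testBit, List.mem_range.1 hj]

theorem map_getD_range (nums : List Int) :
    (List.range nums.length).map (fun i => nums.getD i 0) = nums := by
  apply List.ext_getElem
  · simp
  · intro i h1 h2
    simp [List.getD_eq_getElem?_getD, List.getElem?_eq_getElem h2]

theorem bitSum_full (nums : List Int) :
    bitSum nums ((1 <<< nums.length) - 1) = nums.foldl (· + ·) 0 := by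
  unfold bitSum
  rw [List.filter_eq_self.2, map_getD_range, ← List.sum_eq_foldl]
  intro j hj
  simp [full_testBit, List.mem_range.1 hj]

theorem full_lt (n : Nat) : (1 <<< n) - 1 < 2 ^ n := by
  rw [Nat.one_shiftLeft]
  have := Nat.two_pow_pos n
  omega

theorem enum_fold (nums : List Int) (f : Int → (Int × Int) → Int) (init : Int) :
    (PySem.List.enumerate nums).foldl f init
      = (List.range nums.length).foldl (fun acc (j : Nat) => f acc ((j : Int), nums.getD j 0)) init := by
  rw [PySem.List.enumerate_eq_map_pyRange nums 0, List.foldl_map]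
  have hlen : PySem.List.len nums = (nums.length : Int) := by simp
  rw [hlen, PySem.List.pyRange_zero_natCast nums.length, List.foldl_map]
  simp [PySem.List.pyGetD_natCast]

-- ===== A-side: the backtracking helper computes W =====
theorem pyHelper_eq_W (nums : List Int) : ∀ (fuel : Nat), ∀ (mask : Nat) (sub : PySem.Set Int) (r : Int),
    mask < 2 ^ nums.length → cnt mask nums.length ≤ fuel → r = bitSum nums mask →
    (∀ j : Nat, j < nums.length → PySem.Set.contains sub (j : Int) = !(mask.testBit j)) →
    pyHelper nums fuel r sub = W nums mask := by
  intro fuel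
  induction fuel with
  | zero =>
    intro mask sub r hlt hc hr _
    have hm0 : mask = 0 := mask_eq_zero mask _ hlt (Nat.le_zero.1 hc)
    subst hm0
    rw [W_zero]
    rfl
  | succ fuel ih =>
    intro mask sub r hlt hc hr hcorr
    subst hr
    rw [W]
    simp only [pyHelper]
    split_ifs with h1 h2
    · rfl
    · rfl
    · rw [enum_fold]
      apply PySem.List.foldl_congr_mem
      intro acc j hj
      have hjn : j < nums.length := List.mem_range.1 hj
      by_cases hb : mask.testBit j
      · rw [hcorr j hjn, hb]
        simp only [Bool.not_true, Bool.false_eq_true, if_false, dif_pos hb]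
        congr 1
        apply ih
        · exact lt_trans (xor_lt _ _ hb) hlt
        · rw [cnt_xor _ _ _ hjn hb]
          have := cnt_pos mask j nums.length hjn hb
          omega
        · exact (bitSum_xor nums mask j hjn hb).symm
        · intro k hk
          rw [set_contains_add, hcorr k hk, testBit_xor_shift]
          by_cases hkj : k = j
          · subst hkj
            simp [hb]
          · have : ((k : Int) == (j : Int)) = false := by
              simp [hkj]
            simp [this, hkj]
      · have hbf : mask.testBit j = false := by simpa using hb
        rw [hcorr j hjn, hbf]
        simp [dif_neg hb]

-- ===== B-side: the memoized solver computes W =====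
def Sound (nums : List Int) (memo : PySem.Dict Nat Int) : Prop :=
  ∀ k v, memo.get? k = some v → v = W nums k

theorem solveB_eq_W (nums : List Int) : ∀ (fuel : Nat), ∀ (mask : Nat) (s : Int) (memo : PySem.Dict Nat Int),
    mask < 2 ^ nums.length → cnt mask nums.length ≤ fuel → s = bitSum nums mask →
    Sound nums memo →
    (solveB nums fuel mask s memo).1 = W nums mask ∧
      Sound nums (solveB nums fuel mask s memo).2 := by
  intro fuel
  induction fuel with
  | zero =>
    intro mask s memo hlt hc hs hsound
    have hm0 : mask = 0 := mask_eq_zero mask _ hlt (Nat.le_zero.1 hc)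
    subst hm0
    exact ⟨by rw [W_zero]; rfl, hsound⟩
  | succ fuel ih =>
    intro mask s memo hlt hc hs hsound
    subst hs
    simp only [solveB]
    by_cases h1 : bitSum nums mask < 3
    · rw [if_pos h1, W, if_pos h1]
      exact ⟨rfl, hsound⟩
    · rw [if_neg h1]
      by_cases h2 : PySem.Int.mod (bitSum nums mask) 3 = 0
      · rw [if_pos h2, W, if_neg h1, if_pos h2]
        exact ⟨rfl, hsound⟩
      · rw [if_neg h2]
        have hWmask : W nums mask = (List.range nums.length).foldl
            (fun v i => if h : mask.testBit i then max v (W nums (mask ^^^ (1 <<< i))) else v) 0 := by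
          rw [W, if_neg h1, if_neg h2]
        cases hget : memo.get? mask with
        | some v =>
          simp only
          refine ⟨?_, hsound⟩
          rw [hsound mask v hget, hWmask]
        | none =>
          simp only
          have key : ∀ (l : List Nat), (∀ j ∈ l, j < nums.length) →
              ∀ (acc : Int) (m0 : PySem.Dict Nat Int), Sound nums m0 →
              (l.foldl (fun (a : Int × PySem.Dict Nat Int) i =>
                  if (mask >>> i) &&& 1 = 1 then
                    (max a.1 (solveB nums fuel (mask ^^^ (1 <<< i))
                        (bitSum nums mask - nums.getD i 0) a.2).1,
                      (solveB nums fuel (mask ^^^ (1 <<< i))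
                        (bitSum nums mask - nums.getD i 0) a.2).2)
                  else a) (acc, m0)).1
                = l.foldl (fun v i => if h : mask.testBit i
                    then max v (W nums (mask ^^^ (1 <<< i))) else v) acc ∧
              Sound nums (l.foldl (fun (a : Int × PySem.Dict Nat Int) i =>
                  if (mask >>> i) &&& 1 = 1 then
                    (max a.1 (solveB nums fuel (mask ^^^ (1 <<< i))
                        (bitSum nums mask - nums.getD i 0) a.2).1,
                      (solveB nums fuel (mask ^^^ (1 <<< i))
                        (bitSum nums mask - nums.getD i 0) a.2).2)
                  else a) (acc, m0)).2 := by
            intro l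
            induction l with
            | nil => intro _ acc m0 hm0; exact ⟨rfl, hm0⟩
            | cons j t iht =>
              intro hjt acc m0 hm0
              have hjn : j < nums.length := hjt j List.mem_cons_self
              have htt : ∀ k ∈ t, k < nums.length := fun k hk => hjt k (List.mem_cons_of_mem j hk)
              by_cases hb : mask.testBit j
              · have hcond : (mask >>> j) &&& 1 = 1 := (cond_iff mask j).2 hb
                have hcall := ih (mask ^^^ (1 <<< j)) (bitSum nums mask - nums.getD j 0) m0
                  (lt_trans (xor_lt _ _ hb) hlt)
                  (by rw [cnt_xor _ _ _ hjn hb]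
                      have := cnt_pos mask j nums.length hjn hb
                      omega)
                  ((bitSum_xor nums mask j hjn hb).symm) hm0
                simp only [List.foldl_cons, if_pos hcond, dif_pos hb]
                rw [hcall.1]
                exact iht htt _ _ hcall.2
              · have hcond : ¬ ((mask >>> j) &&& 1 = 1) := fun hcc => hb ((cond_iff mask j).1 hcc)
                simp only [List.foldl_cons, if_neg hcond, dif_neg hb]
                exact iht htt _ _ hm0
          have hkey := key (List.range nums.length) (fun j hj => List.mem_range.1 hj) 0 memo hsound
          refine ⟨?_, ?_⟩
          · rw [hWmask]
            exact hkey.1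
          intro k v hkv
          rw [PySem.Dict.get?_insert] at hkv
          by_cases hkm : k = mask
          · rw [if_pos hkm] at hkv
            cases hkv
            rw [hkey.1, hkm, hWmask]
          · rw [if_neg hkm] at hkv
            exact hkey.2 k v hkv

theorem max_sum_three_eq_W (nums : List Int) :
    max_sum_three nums = W nums ((1 <<< nums.length) - 1) := by
  unfold max_sum_three
  apply pyHelper_eq_W nums _ _ _ _ (full_lt nums.length)
  · rw [cnt_full]; omega
  · exact (bitSum_full nums).symm
  · intro j hj
    simp [full_testBit, hj, PySem.Set.empty, PySem.Set.contains]

theorem max_sum_three_alt_eq_W (nums : List Int) :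
    max_sum_three_alt nums = W nums ((1 <<< nums.length) - 1) := by
  unfold max_sum_three_alt
  refine (solveB_eq_W nums _ _ _ _ (full_lt nums.length) ?_ ?_ ?_).1
  · rw [cnt_full]; omega
  · exact (bitSum_full nums).symm
  · intro k v hv
    simp [PySem.Dict.empty, PySem.Dict.get?] at hv

-- ===== VERDICT (by name: the statement is the Claim_ definition above) =====
theorem max_sum_three_spec : Claim_equal_max_sum_three := by
  intro nums _
  unfold Spec_max_sum_three
  rw [max_sum_three_eq_W, max_sum_three_alt_eq_W]
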